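-- pv_equiv track=rewrite | github.com/mearchenzyy/EAB | EAB_CB_data_analysis.py | map_statepop_2_ibm_mapping_no_ancilla
-- ===== SOURCE A (Python) =====
-- def map_statepop_2_ibm_mapping_no_ancilla(counts,n):
--     counts_ibm_mapping=[0 for i in range (2**(n))]
--     idx_ibm_mapping=[]
--     counts_ibm_mapping_dic={}
--     if len(str(n))<2:
--         f="00"+str(n)+"b"
--     elif len(str(n))<3:
--         f="0"+str(n)+"b"
--     else:
--         raise ValueError("n is too big")
--     for gates_idx in range (2**(n)):
--         gates_idx_str=format(gates_idx,f)
--         ibm_idx=0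
--         for i in range (n):
--             ibm_idx+=2**(i)*int(gates_idx_str[i])
--         ibm_idx_str=format(ibm_idx,f)
-- #         idx_ibm_mapping.append(ibm_idx_str)
--         counts_ibm_mapping[ibm_idx]=counts[gates_idx]
--         counts_ibm_mapping_dic[ibm_idx_str]=counts[gates_idx]
--     return counts_ibm_mapping, counts_ibm_mapping_dic
-- ===== SOURCE B (Python) =====
-- # B: gather instead of scatter -- the output list is built directly by reading
-- # counts at the bit-reversed source index (computed arithmetically, no string
-- # round-trip); the dict is a comprehension over the same range.
-- def _rev(x, n):
--     r = 0
--     for _ in range(n):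
--         r = r * 2 + x % 2
--         x //= 2
--     return r
--
-- def map_statepop_2_ibm_mapping_no_ancilla(counts, n):
--     size = 2 ** n
--     counts_ibm_mapping = [counts[_rev(j, n)] for j in range(size)]
--     counts_ibm_mapping_dic = {format(_rev(g, n), "0%db" % n): counts[g] for g in range(size)}
--     return counts_ibm_mapping, counts_ibm_mapping_dic
-- ===== Notes on version B (the rewrite author's own statement) =====
-- stated objective: alternative
-- what changed: A scatters: for each source index it formats it as a zero-padded binary string, re-parses the digits to get the bit-reversed target, and writes into a preallocated zero list and a dict; B gathers: it builds the output list directly as counts[rev(j)] using an arithmetic bit-reversal (divmod loop, no string round-trip, relying on rev being an involution) and builds the dict by a comprehension.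
import Mathlib
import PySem

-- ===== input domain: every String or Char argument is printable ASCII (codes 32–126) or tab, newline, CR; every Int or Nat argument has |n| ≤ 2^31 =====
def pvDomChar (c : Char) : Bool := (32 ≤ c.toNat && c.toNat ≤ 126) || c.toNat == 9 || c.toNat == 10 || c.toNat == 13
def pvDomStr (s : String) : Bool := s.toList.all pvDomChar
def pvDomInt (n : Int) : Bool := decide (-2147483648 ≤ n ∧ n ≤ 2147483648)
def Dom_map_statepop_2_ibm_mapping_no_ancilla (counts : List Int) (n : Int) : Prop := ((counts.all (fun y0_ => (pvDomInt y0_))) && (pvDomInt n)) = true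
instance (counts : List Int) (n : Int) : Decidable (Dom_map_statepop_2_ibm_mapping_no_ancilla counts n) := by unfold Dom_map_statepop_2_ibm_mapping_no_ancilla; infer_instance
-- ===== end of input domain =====

-- B replaces A's format/parse scatter (write counts[g] into slot rev(g)) by a direct gather
-- (read counts[rev(j)] for each output slot j) with an arithmetic bit reversal; same cost class.

-- ===== PORT A =====
-- int(c) for a single digit character; exact for '0'..'9' (call sites only pass '0'/'1')
def pvDigitInt (c : Char) : Int := (c.toNat : Int) - 48

-- format(x, '0{w}b'): zero-padded width-w binary. Exact for x < 2^w when w ≥ 1; for w = 0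
-- Python pads nothing and prints the minimal representation, which is "0" at every call site
-- reached inside Pre_ (there x = 0 when w = 0).
def pvFormatBinChars (x : Nat) (w : Nat) : List Char :=
  if w = 0 then ['0']
  else (List.range w).map (fun i => if x / 2 ^ (w - 1 - i) % 2 = 1 then '1' else '0')

def map_statepop_2_ibm_mapping_no_ancilla (counts : List Int) (n : Int) : List Int × (List (String × Int)) :=
  let m : Nat := 2 ^ n.toNat          -- 2**n; inside Pre_ n ≥ 0 (a negative n raises TypeError in Python)
  let init : List Int := List.replicate m 0     -- [0 for i in range(2**n)]
  if PySem.Str.len (PySem.Int.toStr n) < 3 then -- both non-raising branches build a zero-pad width-n binary format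
    let st := (PySem.List.pyRange 0 (m : Int)).foldl
      (fun st g =>
        let gs := pvFormatBinChars g.toNat n.toNat          -- gates_idx_str = format(gates_idx, f)
        let ibm : Int := (PySem.List.pyRange 0 n).foldl
          (fun acc i => acc + 2 ^ i.toNat * pvDigitInt (gs.getD i.toNat '0')) 0
                                                            -- gates_idx_str[i]: always in range here (|gs| = n)
        let ibmStr : String := String.ofList (pvFormatBinChars ibm.toNat n.toNat)
        let c : Int := (PySem.List.pyGet? counts g).getD 0  -- counts[gates_idx]; some inside Pre_
        (st.1.set ibm.toNat c, PySem.Dict.insert st.2 ibmStr c))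
      (init, (PySem.Dict.empty : PySem.Dict String Int))
    (st.1, st.2.items)
  else (init, [])                     -- raise ValueError("n is too big"): outside Pre_

-- ===== PORT B =====
-- _rev(x, n): arithmetic bit-reversal loop (r = r*2 + x%2; x //= 2, n times)
def pvRevAux : Nat → Nat → Nat → Nat
  | 0, _, r => r
  | k + 1, x, r => pvRevAux k (x / 2) (r * 2 + x % 2)

def pvRev (x : Nat) (n : Nat) : Nat := pvRevAux n x 0

def map_statepop_2_ibm_mapping_no_ancilla_alt (counts : List Int) (n : Int) : List Int × (List (String × Int)) :=
  let m : Nat := 2 ^ n.toNat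
  let lst := (PySem.List.pyRange 0 (m : Int)).map
      (fun j => (PySem.List.pyGet? counts ((pvRev j.toNat n.toNat : Nat) : Int)).getD 0)
  let dic := (PySem.List.pyRange 0 (m : Int)).foldl
      (fun d g => PySem.Dict.insert d (String.ofList (pvFormatBinChars (pvRev g.toNat n.toNat) n.toNat))
                    ((PySem.List.pyGet? counts g).getD 0))
      (PySem.Dict.empty : PySem.Dict String Int)
  (lst, dic.items)

-- ===== PRECONDITION & SPEC =====
-- Pre_ excludes exactly the inputs on which A raises: n < 0 (TypeError: range over the float 2**n),
-- n ≥ 100 (ValueError "n is too big"), and counts shorter than 2**n (IndexError on counts[gates_idx]).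
def Pre_map_statepop_2_ibm_mapping_no_ancilla (counts : List Int) (n : Int) : Prop :=
  0 ≤ n ∧ n < 100 ∧ 2 ^ n.toNat ≤ counts.length
instance (counts : List Int) (n : Int) : Decidable (Pre_map_statepop_2_ibm_mapping_no_ancilla counts n) := by
  unfold Pre_map_statepop_2_ibm_mapping_no_ancilla; infer_instance

def pvWitness_map_statepop_2_ibm_mapping_no_ancilla : List Int × Int := ([1, 2, 3, 4], 2)

def Spec_map_statepop_2_ibm_mapping_no_ancilla (counts : List Int) (n : Int) (out : List Int × (List (String × Int))) : Prop := out = map_statepop_2_ibm_mapping_no_ancilla_alt counts n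
instance (counts : List Int) (n : Int) (out : List Int × (List (String × Int))) : Decidable (Spec_map_statepop_2_ibm_mapping_no_ancilla counts n out) := by unfold Spec_map_statepop_2_ibm_mapping_no_ancilla; infer_instance

-- ===== CLAIM (what is proved, stated in full; the proofs are below) =====
def Claim_equal_map_statepop_2_ibm_mapping_no_ancilla : Prop := ∀ (counts : List Int) (n : Int), Dom_map_statepop_2_ibm_mapping_no_ancilla counts n → Pre_map_statepop_2_ibm_mapping_no_ancilla counts n → Spec_map_statepop_2_ibm_mapping_no_ancilla counts n (map_statepop_2_ibm_mapping_no_ancilla counts n)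

-- ===== LEMMAS AND PROOFS =====

-- closed form of B's reversal loop
theorem pvRevAux_closed (k : Nat) : ∀ (x r : Nat),
    pvRevAux k x r = r * 2 ^ k + ∑ i ∈ Finset.range k, 2 ^ i * (x / 2 ^ (k - 1 - i) % 2) := by
  induction k with
  | zero => intro x r; simp [pvRevAux]
  | succ k ih =>
    intro x r
    rw [pvRevAux, ih, Finset.sum_range_succ]
    have hterm : ∀ i ∈ Finset.range k, 2 ^ i * (x / 2 / 2 ^ (k - 1 - i) % 2) = 2 ^ i * (x / 2 ^ (k + 1 - 1 - i) % 2) := by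
      intro i hi
      have : k + 1 - 1 - i = (k - 1 - i) + 1 := by
        simp at hi; omega
      rw [this, pow_succ, Nat.mul_comm (2 ^ (k - 1 - i)) 2, ← Nat.div_div_eq_div_mul]
    rw [Finset.sum_congr rfl hterm]
    have : k + 1 - 1 - k = 0 := by omega
    rw [this]
    simp [pow_succ]
    ring

theorem pvRev_eq_sum (x n : Nat) :
    pvRev x n = ∑ i ∈ Finset.range n, 2 ^ i * (x / 2 ^ (n - 1 - i) % 2) := by
  rw [pvRev, pvRevAux_closed]; simp

theorem pvRev_succ (x n : Nat) : pvRev x (n + 1) = x % 2 * 2 ^ n + pvRev (x / 2) n := by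
  show pvRevAux (n + 1) x 0 = _
  rw [pvRevAux]
  rw [pvRevAux_closed, pvRev_eq_sum]
  simp

theorem pvRev_lt (x n : Nat) : pvRev x n < 2 ^ n := by
  induction n generalizing x with
  | zero => simp [pvRev, pvRevAux]
  | succ n ih =>
    rw [pvRev_succ]
    have h1 := ih (x / 2)
    have h2 : x % 2 ≤ 1 := by omega
    have h3 : x % 2 * 2 ^ n ≤ 2 ^ n := by
      calc x % 2 * 2 ^ n ≤ 1 * 2 ^ n := Nat.mul_le_mul_right _ h2
      _ = 2 ^ n := by ring
    have : (2 : Nat) ^ (n + 1) = 2 ^ n + 2 ^ n := by ring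
    omega

-- digit j of pvRev x n is digit (n-1-j) of x
theorem pvRev_digit : ∀ (n x j : Nat), j < n →
    pvRev x n / 2 ^ j % 2 = x / 2 ^ (n - 1 - j) % 2 := by
  intro n
  induction n with
  | zero => intro x j h; omega
  | succ n ih =>
    intro x j hj
    rw [pvRev_succ]
    rcases Nat.lt_or_ge j n with h | h
    · have h2 : x % 2 * 2 ^ n = (x % 2 * 2 ^ (n - j)) * 2 ^ j := by
        rw [Nat.mul_assoc, ← pow_add]; congr 2; omega
      rw [h2, Nat.add_comm, Nat.add_mul_div_right _ _ (Nat.two_pow_pos j)]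
      have h3 : x % 2 * 2 ^ (n - j) = (x % 2 * 2 ^ (n - j - 1)) * 2 := by
        rw [Nat.mul_assoc, ← pow_succ]; congr 2; omega
      rw [h3, Nat.add_mul_mod_self_right]
      rw [ih (x / 2) j h]
      have h4 : x / 2 / 2 ^ (n - 1 - j) = x / 2 ^ (n + 1 - 1 - j) := by
        rw [Nat.div_div_eq_div_mul, ← pow_succ']; congr 2; omega
      rw [h4]
    · have hje : j = n := by omega
      subst hje
      rw [Nat.add_comm, Nat.add_mul_div_right _ _ (Nat.two_pow_pos j)]
      rw [Nat.div_eq_of_lt (pvRev_lt _ _)]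
      simp

-- binary expansion: a number below 2^n is the weighted sum of its digits
theorem sum_digits_eq (n : Nat) : ∀ x : Nat, x < 2 ^ n →
    ∑ i ∈ Finset.range n, 2 ^ i * (x / 2 ^ i % 2) = x := by
  induction n with
  | zero => intro x hx; interval_cases x; simp
  | succ n ih =>
    intro x hx
    rw [Finset.sum_range_succ']
    have hterm : ∀ i ∈ Finset.range n, 2 ^ (i + 1) * (x / 2 ^ (i + 1) % 2) = 2 * (2 ^ i * (x / 2 / 2 ^ i % 2)) := by
      intro i hi
      rw [pow_succ', Nat.div_div_eq_div_mul, ← pow_succ']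
      ring
    rw [Finset.sum_congr rfl hterm, ← Finset.mul_sum]
    have hx2 : x / 2 < 2 ^ n := by
      have : (2 : Nat) ^ (n + 1) = 2 ^ n * 2 := by ring
      omega
    rw [ih _ hx2]
    simp
    omega

-- the reversal is an involution
theorem pvRev_invol (x n : Nat) (hx : x < 2 ^ n) : pvRev (pvRev x n) n = x := by
  rw [pvRev_eq_sum (pvRev x n) n]
  have hterm : ∀ i ∈ Finset.range n, 2 ^ i * (pvRev x n / 2 ^ (n - 1 - i) % 2) = 2 ^ i * (x / 2 ^ i % 2) := by
    intro i hi
    simp only [Finset.mem_range] at hi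
    rw [pvRev_digit n x (n - 1 - i) (by omega)]
    have he : n - 1 - (n - 1 - i) = i := by omega
    rw [he]
  rw [Finset.sum_congr rfl hterm, sum_digits_eq n x hx]

theorem list_sum_range (f : Nat → Int) (n : Nat) :
    ((List.range n).map f).sum = ∑ i ∈ Finset.range n, f i := rfl

-- A's inner string loop computes exactly B's arithmetic reversal
theorem ibm_eq (N g : Nat) :
    (PySem.List.pyRange 0 (N : Int)).foldl
      (fun acc i => acc + 2 ^ i.toNat * pvDigitInt ((pvFormatBinChars g N).getD i.toNat '0')) 0
      = ((pvRev g N : Nat) : Int) := by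
  rw [PySem.List.pyRange_zero_natCast, List.foldl_map]
  rcases Nat.eq_zero_or_pos N with h0 | hN
  · subst h0; simp [pvRev, pvRevAux]
  have hstep : ∀ (acc : Int), ∀ i ∈ List.range N,
      acc + 2 ^ ((i : Int)).toNat * pvDigitInt ((pvFormatBinChars g N).getD ((i : Int)).toNat '0')
        = acc + ((2 ^ i * (g / 2 ^ (N - 1 - i) % 2) : Nat) : Int) := by
    intro acc i hi
    simp only [List.mem_range] at hi
    have hlen : i < (pvFormatBinChars g N).length := by
      simp [pvFormatBinChars, if_neg (by omega : ¬ N = 0), hi]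
    rw [Int.toNat_natCast, List.getD_eq_getElem _ _ hlen]
    have hget : (pvFormatBinChars g N)[i] = if g / 2 ^ (N - 1 - i) % 2 = 1 then '1' else '0' := by
      simp [pvFormatBinChars, if_neg (by omega : ¬ N = 0)]
    rw [hget]
    rcases Nat.mod_two_eq_zero_or_one (g / 2 ^ (N - 1 - i)) with h | h <;>
      simp [h, pvDigitInt]
  rw [PySem.List.foldl_congr_mem _ _ _ _ hstep]
  rw [PySem.List.foldl_add, list_sum_range]
  rw [pvRev_eq_sum]
  push_cast
  simp

-- scatter loop: length is preserved
theorem foldl_set_length (σ : Nat → Nat) (v : Nat → Int) (gs : List Nat) : ∀ (L : List Int),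
    (gs.foldl (fun l g => l.set (σ g) (v g)) L).length = L.length := by
  induction gs with
  | nil => intro L; rfl
  | cons g gs ih => intro L; rw [List.foldl_cons, ih, List.length_set]

-- scatter loop through an involution, read back pointwise
theorem foldl_set_getD (σ : Nat → Nat) (v : Nat → Int) (gs : List Nat) : ∀ (L : List Int),
    (∀ j, j < L.length → σ (σ j) = j) →
    (∀ j, j < L.length → σ j < L.length) →
    (∀ g ∈ gs, g < L.length) → ∀ (j : Nat), j < L.length →
    (gs.foldl (fun l g => l.set (σ g) (v g)) L).getD j 0 =
      if σ j ∈ gs then v (σ j) else L.getD j 0 := by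
  induction gs with
  | nil => intro L _ _ _ j hj; simp
  | cons g gs ih =>
    intro L hσ hσlt hg j hj
    rw [List.foldl_cons]
    have hlen : (L.set (σ g) (v g)).length = L.length := List.length_set ..
    have hglt : g < L.length := hg g (by simp)
    rw [ih (L.set (σ g) (v g)) (by rw [hlen]; exact hσ) (by rw [hlen]; exact hσlt)
        (fun g' hg' => by rw [hlen]; exact hg g' (by simp [hg'])) j (by rw [hlen]; exact hj)]
    by_cases hmem : σ j ∈ gs
    · simp [hmem]
    · simp only [hmem, if_false]
      have hset : (L.set (σ g) (v g)).getD j 0 = if σ g = j then v g else L.getD j 0 := by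
        rw [List.getD_eq_getElem _ _ (by rw [hlen]; exact hj), List.getElem_set,
            List.getD_eq_getElem _ _ hj]
      rw [hset]
      by_cases hgj : σ g = j
      · have : σ j = g := by rw [← hgj, hσ g hglt]
        simp [hgj, this]
      · have hne : σ j ≠ g := by
          intro hc
          apply hgj
          rw [← hc, hσ j hj]
        simp [hgj, List.mem_cons, hne, hmem]

-- str(n) has at most 2 characters for 0 ≤ n < 100
theorem len_toStr_small (n : Int) (h0 : 0 ≤ n) (h1 : n < 100) :
    PySem.Str.len (PySem.Int.toStr n) < 3 := by
  lift n to Nat using h0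
  have h1' : n < 100 := by exact_mod_cast h1
  interval_cases n <;> decide

-- ===== VERDICT (by name: the statement is the Claim_ definition above) =====
theorem map_statepop_2_ibm_mapping_no_ancilla_spec : Claim_equal_map_statepop_2_ibm_mapping_no_ancilla := by
  intro counts n hDom hPre
  obtain ⟨h0, h100, hlen⟩ := hPre
  unfold Spec_map_statepop_2_ibm_mapping_no_ancilla
  lift n to Nat using h0 with N
  simp only [map_statepop_2_ibm_mapping_no_ancilla, map_statepop_2_ibm_mapping_no_ancilla_alt,
    Int.toNat_natCast]
  rw [if_pos (len_toStr_small _ (by positivity) (by exact_mod_cast h100))]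
  rw [Int.toNat_natCast] at hlen
  rw [PySem.List.foldl_prod_mk
      (f := fun (l : List Int) (g : Int) =>
        l.set ((PySem.List.pyRange 0 (N : Int)).foldl
          (fun acc i => acc + 2 ^ i.toNat * pvDigitInt ((pvFormatBinChars g.toNat N).getD i.toNat '0')) 0).toNat
          ((PySem.List.pyGet? counts g).getD 0))
      (g := fun (d : PySem.Dict String Int) (g : Int) =>
        PySem.Dict.insert d (String.ofList (pvFormatBinChars
          ((PySem.List.pyRange 0 (N : Int)).foldl
            (fun acc i => acc + 2 ^ i.toNat * pvDigitInt ((pvFormatBinChars g.toNat N).getD i.toNat '0')) 0).toNat N))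
          ((PySem.List.pyGet? counts g).getD 0))]
  rw [PySem.List.pyRange_zero_natCast (2 ^ N), List.foldl_map, List.foldl_map, List.foldl_map, List.map_map,
      Prod.mk.injEq]
  constructor
  -- list component
  · have hstep : ∀ (l : List Int), ∀ gn ∈ List.range (2 ^ N),
        l.set ((PySem.List.pyRange 0 (N : Int)).foldl
          (fun acc i => acc + 2 ^ i.toNat * pvDigitInt ((pvFormatBinChars ((gn : Int)).toNat N).getD i.toNat '0')) 0).toNat
          ((PySem.List.pyGet? counts (gn : Int)).getD 0)
        = l.set (pvRev gn N) ((PySem.List.pyGet? counts (gn : Int)).getD 0) := by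
      intro l gn _
      rw [Int.toNat_natCast, ibm_eq, Int.toNat_natCast]
    rw [PySem.List.foldl_congr_mem _ _ _ _ hstep]
    apply List.ext_getElem
    · rw [foldl_set_length]
      simp
    · intro j hjl hjr
      have hj : j < 2 ^ N := by
        have := hjl
        rw [foldl_set_length, List.length_replicate] at this
        exact this
      have hLl : (List.replicate (2 ^ N) (0 : Int)).length = 2 ^ N := List.length_replicate ..
      rw [← List.getD_eq_getElem _ 0, ← List.getD_eq_getElem _ 0]
      rw [foldl_set_getD (fun j => pvRev j N) _ _ _
          (fun j hj => pvRev_invol j N (by rwa [hLl] at hj))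
          (fun j hj => by rw [hLl] at hj ⊢; exact pvRev_lt j N)
          (fun g hg => by rw [hLl]; simpa using hg) j (by rwa [hLl])]
      rw [if_pos (by simp [List.mem_range, pvRev_lt])]
      simp [hj]
  -- dict component
  · have hstep : ∀ (d : PySem.Dict String Int), ∀ gn ∈ List.range (2 ^ N),
        PySem.Dict.insert d (String.ofList (pvFormatBinChars
          ((PySem.List.pyRange 0 (N : Int)).foldl
            (fun acc i => acc + 2 ^ i.toNat * pvDigitInt ((pvFormatBinChars ((gn : Int)).toNat N).getD i.toNat '0')) 0).toNat N))
          ((PySem.List.pyGet? counts (gn : Int)).getD 0)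
        = PySem.Dict.insert d (String.ofList (pvFormatBinChars (pvRev ((gn : Int)).toNat N) N))
          ((PySem.List.pyGet? counts (gn : Int)).getD 0) := by
      intro d gn _
      rw [Int.toNat_natCast, ibm_eq, Int.toNat_natCast]
    rw [PySem.List.foldl_congr_mem _ _ _ _ hstep]
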